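/- GENERATED by farm/mkstatement.py from design/units.split.tsv — do not edit.
   THE SPLIT of the proof unit `decode_residue.7` into `decode_residue.7a`, `decode_residue.7b`, `decode_residue.7c`: the children's statements give the parent's
   UNCHANGED statement (so nothing above the parent — callers, compositions — is touched by the split). -/
import Vorbis.Spec.DecodeResidue7
import Vorbis.Spec.Units.decode_residue_7
import Vorbis.Spec.Units.decode_residue_7a
import Vorbis.Spec.Units.decode_residue_7b
import Vorbis.Spec.Units.decode_residue_7c
namespace Vorbis.Spec.Splits
open X86 X86.User Asan

/-- The children of the split unit `decode_residue.7` prove it, by `Vorbis.Spec.DecodeResidue.Seg7.of_parts`. -/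
theorem decode_residue_7
    (h_decode_residue_7a : Vorbis.Spec.decode_residue_7a.Statement)
    (h_decode_residue_7b : Vorbis.Spec.decode_residue_7b.Statement)
    (h_decode_residue_7c : Vorbis.Spec.decode_residue_7c.Statement) :
    Vorbis.Spec.decode_residue_7.Statement := by
  intro Lay _hLay μ _hμ u₀ _hcode _h_asan_load8_noabort _h_asan_load1_noabort _h_asan_load4_noabort _h_asan_load2_noabort _h_asan_store8_noabort _h_prep_huffman _h_codebook_decode_scalar_raw
  apply Vorbis.Spec.DecodeResidue.Seg7.of_parts
  · exact h_decode_residue_7a Lay _hLay μ _hμ u₀ _hcode _h_asan_load8_noabort _h_asan_load1_noabort _h_asan_load4_noabort _h_prep_huffman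
  · exact h_decode_residue_7b Lay _hLay μ _hμ u₀ _hcode _h_asan_load8_noabort _h_asan_load1_noabort _h_asan_load4_noabort _h_asan_load2_noabort _h_codebook_decode_scalar_raw
  · exact h_decode_residue_7c Lay _hLay μ _hμ u₀ _hcode _h_asan_load8_noabort _h_asan_load1_noabort _h_asan_load4_noabort _h_asan_store8_noabort

end Vorbis.Spec.Splits
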